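-- pv_equiv track=rewrite | github.com/luml-ai/luml | luml-agent/src/luml_agent/cli/inspect.py | _collect_ordered_keys
-- ===== SOURCE A (Python) =====
-- from typing import Any
--
-- def _collect_ordered_keys(
--     maps: list[dict[str, Any]],
-- ) -> list[str]:
--     result: list[str] = []
--     seen: set[str] = set()
--     for m in maps:
--         for k in m:
--             if k not in seen:
--                 result.append(k)
--                 seen.add(k)
--     return result
-- ===== SOURCE B (Python) =====
-- def _collect_ordered_keys(maps):
--     flat = [k for m in maps for k in m]
--     first = {k: i for i, k in reversed(list(enumerate(flat)))}
--     return sorted(first, key=first.__getitem__)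
-- ===== Notes on version B (the rewrite author's own statement) =====
-- stated objective: alternative
-- what changed: Replaces the single pass with a result list plus seen set by a staged sort-based scheme: flatten all keys, build a first-occurrence-index dict from a reversed enumerate comprehension (later overwrites win, so the first index survives), then sort the distinct keys by that index.
import Mathlib
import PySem

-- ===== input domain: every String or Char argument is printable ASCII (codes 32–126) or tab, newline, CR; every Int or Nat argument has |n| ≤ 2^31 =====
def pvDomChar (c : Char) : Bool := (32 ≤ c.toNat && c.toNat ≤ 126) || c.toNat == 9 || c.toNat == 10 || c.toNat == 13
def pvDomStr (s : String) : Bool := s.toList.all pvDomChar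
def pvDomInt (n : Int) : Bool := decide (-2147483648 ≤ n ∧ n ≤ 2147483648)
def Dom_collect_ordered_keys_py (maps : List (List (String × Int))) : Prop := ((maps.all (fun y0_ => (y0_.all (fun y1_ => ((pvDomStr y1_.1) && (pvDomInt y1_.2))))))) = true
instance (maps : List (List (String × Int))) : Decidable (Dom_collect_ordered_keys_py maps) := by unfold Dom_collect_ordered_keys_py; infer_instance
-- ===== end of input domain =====

-- B drops A's result-list/seen-set single pass for a staged scheme: flatten, build a first-occurrence-index dict from a reversed enumerate, sort keys by it (alternative; not faster).

-- ===== PORT A =====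
-- result/seen loop: state is (result, seen); append+add only when the key is unseen
def collect_ordered_keys_py (maps : List (List (String × Int))) : List String :=
  (maps.foldl
    (fun (st : List String × PySem.Set String) m =>
      m.foldl
        (fun st p =>
          if !(PySem.Set.contains st.2 p.1) then
            (st.1 ++ [p.1], PySem.Set.add st.2 p.1)
          else st)
        st)
    ([], PySem.Set.empty)).1

-- ===== PORT B =====
-- flat = [k for m in maps for k in m]
-- first = {k: i for i, k in reversed(list(enumerate(flat)))}   (dict comprehension: insert in order, overwrite)
-- return sorted(first, key=first.__getitem__)
def collect_ordered_keys_py_alt (maps : List (List (String × Int))) : List String :=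
  let flat := maps.flatMap (fun m => m.map (·.1))
  let first := ((PySem.List.enumerate flat 0).reverse).foldl
    (fun d p => d.insert p.2 p.1) (PySem.Dict.empty : PySem.Dict String Int)
  PySem.List.sorted first.keys (fun k => first.getD k 0) false

-- ===== PRECONDITION & SPEC =====
def Spec_collect_ordered_keys_py (maps : List (List (String × Int))) (out : List String) : Prop := out = collect_ordered_keys_py_alt maps
instance (maps : List (List (String × Int))) (out : List String) : Decidable (Spec_collect_ordered_keys_py maps out) := by unfold Spec_collect_ordered_keys_py; infer_instance

-- ===== CLAIM (what is proved, stated in full; the proofs are below) =====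
def Claim_equal_collect_ordered_keys_py : Prop := ∀ (maps : List (List (String × Int))), Dom_collect_ordered_keys_py maps → Spec_collect_ordered_keys_py maps (collect_ordered_keys_py maps)

-- ===== LEMMAS AND PROOFS =====

-- A's per-key step, written over the flat key list
def pvStepA (st : List String × PySem.Set String) (k : String) : List String × PySem.Set String :=
  if !(PySem.Set.contains st.2 k) then (st.1 ++ [k], PySem.Set.add st.2 k) else st

-- A's nested folds are the fold of pvStepA over the flattened key list
theorem pv_A_flat (maps : List (List (String × Int))) (st : List String × PySem.Set String) :
    maps.foldl
      (fun st m =>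
        m.foldl
          (fun st p =>
            if !(PySem.Set.contains st.2 p.1) then
              (st.1 ++ [p.1], PySem.Set.add st.2 p.1)
            else st)
          st)
      st
    = (maps.flatMap (fun m => m.map (·.1))).foldl pvStepA st := by
  induction maps generalizing st with
  | nil => rfl
  | cons m maps ih =>
    simp only [List.foldl_cons, List.flatMap_cons, List.foldl_append, List.foldl_map, ih]
    rfl

-- from a duplicated state (s, s), A's step is Set.add in both components
theorem pv_fold_add (l : List String) (s : PySem.Set String) :
    l.foldl pvStepA (s, s) = (PySem.Set.update s l, PySem.Set.update s l) := by
  induction l generalizing s with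
  | nil => simp [PySem.Set.update]
  | cons k l ih =>
    have hstep : pvStepA (s, s) k = (PySem.Set.add s k, PySem.Set.add s k) := by
      unfold pvStepA
      by_cases h : k ∈ s
      · have hc : PySem.Set.contains s k = true := (PySem.Set.contains_iff s k).2 h
        simp [h]
      · have hc : PySem.Set.contains s k = false := by
          cases hcc : PySem.Set.contains s k
          · rfl
          · exact absurd ((PySem.Set.contains_iff s k).1 hcc) h
        simp [hc, h]
    rw [List.foldl_cons, hstep, ih, PySem.Set.update_cons]

-- A collects exactly set-of-list order: first occurrences of the flattened keys
theorem pv_A_is_ofList (maps : List (List (String × Int))) :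
    collect_ordered_keys_py maps = PySem.Set.ofList (maps.flatMap (fun m => m.map (·.1))) := by
  unfold collect_ordered_keys_py
  rw [pv_A_flat]
  rw [show (([], PySem.Set.empty) : List String × PySem.Set String)
      = ((PySem.Set.empty : PySem.Set String), (PySem.Set.empty : PySem.Set String)) from rfl]
  rw [pv_fold_add]
  rfl

-- a dict built by a fold of inserts: lookup = value of the LAST pair with that key, else the base dict
theorem pv_get?_foldl (l : List (Int × String)) (d : PySem.Dict String Int) (k : String) :
    (l.foldl (fun d p => d.insert p.2 p.1) d).get? k
    = (match l.reverse.find? (fun p => p.2 == k) with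
       | some q => some q.1
       | none => d.get? k) := by
  induction l generalizing d with
  | nil => simp
  | cons p l ih =>
    rw [List.foldl_cons, ih, List.reverse_cons, List.find?_append]
    cases hf : l.reverse.find? (fun p => p.2 == k) with
    | some q => simp
    | none =>
      simp only [Option.none_or]
      by_cases hk : p.2 = k
      · subst hk
        simp [PySem.Dict.get?_insert_self]
      · have : (p.2 == k) = false := by simpa using hk
        simp [this, PySem.Dict.get?_insert_of_ne _ _ (Ne.symm hk)]

-- first match in an enumerate: the index of the first occurrence
theorem pv_find_enumerate (xs : List String) (s : Int) (k : String) :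
    (PySem.List.enumerate xs s).find? (fun p => p.2 == k)
    = if k ∈ xs then some (s + (xs.idxOf k : Int), k) else none := by
  induction xs generalizing s with
  | nil => simp [PySem.List.enumerate_nil]
  | cons x xs ih =>
    rw [PySem.List.enumerate_cons, List.find?_cons]
    by_cases hx : x = k
    · subst hx
      simp [List.idxOf_cons_self]
    · have hb : (x == k) = false := by simpa using hx
      rw [hb, ih (s + 1)]
      have hidx : ((x :: xs).idxOf k : Int) = (xs.idxOf k : Int) + 1 := by
        rw [List.idxOf_cons_ne _ (by simpa using hx)]
        push_cast
        ring
      by_cases hm : k ∈ xs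
      · have : k ∈ x :: xs := List.mem_cons_of_mem _ hm
        simp only [hm, if_true, this, if_true, hidx]
        congr 1
        congr 1
        ring
      · have hkx : ¬ k = x := fun h => hx h.symm
        have : ¬ k ∈ x :: xs := by simp [hm, hkx]
        simp [hm, this]

-- the dict of B maps each occurring key to its FIRST index in flat
theorem pv_getD_first (flat : List String) (k : String) (hk : k ∈ flat) :
    (((PySem.List.enumerate flat 0).reverse).foldl
      (fun d p => d.insert p.2 p.1) (PySem.Dict.empty : PySem.Dict String Int)).getD k 0
    = (flat.idxOf k : Int) := by
  rw [PySem.Dict.getD_eq_get?_getD, pv_get?_foldl, List.reverse_reverse, pv_find_enumerate]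
  simp [hk]

-- first-occurrence order (= ofList order) is strictly increasing in the first-occurrence index
theorem pv_pairwise_idx (xs : List String) :
    (PySem.Set.ofList xs).Pairwise (fun a b => xs.idxOf a < xs.idxOf b) := by
  induction xs with
  | nil => simp [PySem.Set.ofList_nil]
  | cons x xs ih =>
    rw [PySem.Set.ofList_cons]
    constructor
    · intro b hb
      obtain ⟨_, hbx⟩ := (PySem.Set.mem_discard _ _ _).1 hb
      rw [List.idxOf_cons_self, List.idxOf_cons_ne _ (by simpa using (Ne.symm hbx))]
      omega
    · have hsub : (PySem.Set.discard (PySem.Set.ofList xs) x).Sublist (PySem.Set.ofList xs) := by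
        simp only [PySem.Set.discard]
        exact List.filter_sublist
      refine List.Pairwise.imp_of_mem ?_ (ih.sublist hsub)
      intro a b ha hb hab
      obtain ⟨_, hax⟩ := (PySem.Set.mem_discard _ _ _).1 ha
      obtain ⟨_, hbx⟩ := (PySem.Set.mem_discard _ _ _).1 hb
      rw [List.idxOf_cons_ne _ (by simpa using (Ne.symm hax)),
          List.idxOf_cons_ne _ (by simpa using (Ne.symm hbx))]
      omega

-- ===== VERDICT (by name: the statement is the Claim_ definition above) =====
theorem collect_ordered_keys_py_spec : Claim_equal_collect_ordered_keys_py := by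
  intro maps _
  show collect_ordered_keys_py maps = collect_ordered_keys_py_alt maps
  rw [pv_A_is_ofList]
  unfold collect_ordered_keys_py_alt
  set flat := maps.flatMap (fun m => m.map (·.1)) with hflat
  set first := ((PySem.List.enumerate flat 0).reverse).foldl
    (fun d p => d.insert p.2 p.1) (PySem.Dict.empty : PySem.Dict String Int) with hfirst
  have hkeys : first.keys = PySem.Set.ofList flat.reverse := by
    have hk1 := PySem.Dict.keys_foldl_insert_key
      (l := (PySem.List.enumerate flat 0).reverse)
      (key := fun p : Int × String => p.2) (f := fun _ p => p.1)
      (d := (PySem.Dict.empty : PySem.Dict String Int))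
    have h2 : PySem.Set.update (PySem.Dict.empty : PySem.Dict String Int).keys
        (((PySem.List.enumerate flat 0).reverse).map (fun p : Int × String => p.2))
        = PySem.Set.ofList flat.reverse := by
      rw [PySem.Dict.keys_empty, PySem.Set.update_nil_left]
      congr 1
      rw [List.map_reverse, PySem.List.map_snd_enumerate]
    exact hk1.trans h2
  have hperm : (PySem.Set.ofList flat).Perm first.keys := by
    rw [hkeys]
    rw [List.perm_ext_iff_of_nodup (PySem.Set.nodup_ofList _) (PySem.Set.nodup_ofList _)]
    intro a
    simp [PySem.Set.mem_ofList]
  have hpw : (PySem.Set.ofList flat).Pairwise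
      (fun a b => first.getD a 0 < first.getD b 0) := by
    refine List.Pairwise.imp_of_mem ?_ (pv_pairwise_idx flat)
    intro a b ha hb hab
    rw [hfirst, pv_getD_first flat a ((PySem.Set.mem_ofList _ _).1 ha),
        pv_getD_first flat b ((PySem.Set.mem_ofList _ _).1 hb)]
    exact_mod_cast hab
  exact Eq.symm (PySem.List.sorted_eq_of_perm_of_pairwise_lt _ _ _ hperm hpw)
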